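-- pv_equiv track=rewrite | github.com/Todah01/Algorithm_Python | week_2/homework/02_nation_of_delivery_is_available.py | is_available_to_order
-- ===== SOURCE A (Python) =====
-- def is_available_to_order(menus, orders):
--     menus.sort()
--     complete_cnt = 0
--
--     for order in orders:
--         pl = 0
--         pr = len(menus) - 1
--         pc = (pl + pr) // 2
--
--         while pl <= pr:
--             if menus[pc] == order:
--                 complete_cnt += 1
--                 break
--             elif menus[pc] > order:
--                 pr = pc - 1
--             elif menus[pc] < order:
--                 pl = pc + 1
--             pc = (pl + pr) // 2
--
--     if complete_cnt == len(orders):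
--         return True
--     else:
--         return False
-- ===== SOURCE B (Python) =====
-- def is_available_to_order(menus, orders):
--     # Different algorithm: hash-set membership instead of a binary search per order.
--     # menus.sort() is kept to preserve A's in-place mutation of the menus argument.
--     menus.sort()
--     available = set(menus)
--     return all(order in available for order in orders)
-- ===== Notes on version B (the rewrite author's own statement) =====
-- stated objective: faster
-- what changed: Replaces the hand-written per-order binary search and manual hit counter with a hash set built once and a single all(...) membership pass.
import Mathlib
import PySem

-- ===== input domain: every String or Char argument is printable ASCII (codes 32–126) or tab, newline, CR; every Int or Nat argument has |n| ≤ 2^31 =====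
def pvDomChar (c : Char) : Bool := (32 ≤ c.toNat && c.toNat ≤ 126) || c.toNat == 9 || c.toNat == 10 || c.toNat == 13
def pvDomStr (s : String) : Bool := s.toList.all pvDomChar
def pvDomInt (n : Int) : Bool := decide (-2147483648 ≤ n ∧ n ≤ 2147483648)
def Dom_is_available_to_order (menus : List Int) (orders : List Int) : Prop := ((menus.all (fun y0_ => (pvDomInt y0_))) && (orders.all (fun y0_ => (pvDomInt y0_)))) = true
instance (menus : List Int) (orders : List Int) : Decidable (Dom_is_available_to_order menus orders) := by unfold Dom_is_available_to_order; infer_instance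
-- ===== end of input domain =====

-- B replaces A's hand-written per-order binary search with a set built once and one
-- membership pass (objective: simpler). Equivalence is about the RETURN value; both
-- Pythons sort `menus` in place (A needs it, B keeps the same side effect).

-- ===== PORT A =====
-- the `while pl <= pr` binary-search loop; fuel makes it total (the Python loop runs at
-- most pr-pl+1 ≤ len(ms) iterations, so the fuel given below never runs out); the index
-- pc is always in range while pl ≤ pr, so pyGetD's default 0 is never used.
def bsLoop (ms : List Int) (order : Int) : Int → Int → Nat → Bool
  | _, _, 0 => false
  | pl, pr, fuel + 1 =>
    if pl ≤ pr then
      let pc := PySem.Int.floordiv (pl + pr) 2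
      let v := PySem.List.pyGetD ms pc 0
      if v = order then true
      else if v > order then bsLoop ms order pl (pc - 1) fuel
      else if v < order then bsLoop ms order (pc + 1) pr fuel
      else bsLoop ms order pl pr fuel    -- unreachable for Int (trichotomy)
    else false

def is_available_to_order (menus : List Int) (orders : List Int) : Bool :=
  let ms := PySem.List.sorted menus (fun x => x) false   -- menus.sort()
  let cnt : Int := orders.foldl
    (fun c order =>
      if bsLoop ms order 0 ((ms.length : Int) - 1) (ms.length + 1) then c + 1 else c) 0
  if cnt = (orders.length : Int) then true else false

-- ===== PORT B =====
def is_available_to_order_alt (menus : List Int) (orders : List Int) : Bool :=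
  let ms := PySem.List.sorted menus (fun x => x) false   -- menus.sort()
  let available := PySem.Set.ofList ms
  orders.all (fun order => PySem.Set.contains available order)

-- ===== PRECONDITION & SPEC =====
def Spec_is_available_to_order (menus : List Int) (orders : List Int) (out : Bool) : Prop := out = is_available_to_order_alt menus orders
instance (menus : List Int) (orders : List Int) (out : Bool) : Decidable (Spec_is_available_to_order menus orders out) := by unfold Spec_is_available_to_order; infer_instance

-- ===== CLAIM (what is proved, stated in full; the proofs are below) =====
def Claim_equal_is_available_to_order : Prop := ∀ (menus : List Int) (orders : List Int), Dom_is_available_to_order menus orders → Spec_is_available_to_order menus orders (is_available_to_order menus orders)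

-- ===== LEMMAS AND PROOFS =====

-- binary-search correctness: on a sorted list, with every occurrence of `order`
-- inside [pl, pr] and enough fuel, the loop decides membership.
theorem bsLoop_correct (ms : List Int) (order : Int) :
    ∀ (fuel : Nat) (pl pr : Int),
      ms.Pairwise (· ≤ ·) → 0 ≤ pl → pr < (ms.length : Int) →
      (∀ i : Nat, (hi : i < ms.length) → ms[i] = order → pl ≤ (i : Int) ∧ (i : Int) ≤ pr) →
      (pr - pl + 1).toNat ≤ fuel →
      bsLoop ms order pl pr fuel = decide (order ∈ ms) := by
  intro fuel
  induction fuel with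
  | zero =>
    intro pl pr _ _ _ hocc hfuel
    have hlt : pr < pl := by omega
    simp only [bsLoop]
    symm
    simp only [decide_eq_false_iff_not]
    intro hmem
    obtain ⟨i, hi, hval⟩ := List.mem_iff_getElem.mp hmem
    have := hocc i hi hval
    omega
  | succ fuel ih =>
    intro pl pr hs hpl hpr hocc hfuel
    simp only [bsLoop]
    by_cases hle : pl ≤ pr
    · simp only [if_pos hle]
      have hmid := PySem.Int.floordiv_two_mid_bounds hle
      set pc := PySem.Int.floordiv (pl + pr) 2 with hpc
      have hpc0 : 0 ≤ pc := by omega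
      have hpclt : pc < (ms.length : Int) := by omega
      have hpcn : pc.toNat < ms.length := by omega
      have hv : PySem.List.pyGetD ms pc 0 = ms[pc.toNat] :=
        PySem.List.pyGetD_eq_getElem ms 0 hpc0 hpclt
      rw [hv]
      have hpair := List.pairwise_iff_getElem.mp hs
      by_cases heq : ms[pc.toNat] = order
      · simp only [if_pos heq]
        symm
        simp only [decide_eq_true_iff]
        exact heq ▸ List.getElem_mem hpcn
      · simp only [if_neg heq]
        by_cases hgt : ms[pc.toNat] > order
        · simp only [if_pos hgt]
          apply ih pl (pc - 1) hs hpl (by omega)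
          · intro i hi hval
            have h1 := hocc i hi hval
            constructor
            · exact h1.1
            · by_contra hcon
              have hge : pc.toNat ≤ i := by omega
              rcases Nat.lt_or_ge pc.toNat i with hlt' | hge'
              · have := hpair pc.toNat i hpcn hi hlt'
                omega
              · have : i = pc.toNat := by omega
                exact heq (this ▸ hval)
          · omega
        · simp only [if_neg hgt]
          have hlt2 : ms[pc.toNat] < order := by omega
          simp only [if_pos hlt2]
          apply ih (pc + 1) pr hs (by omega) hpr
          · intro i hi hval
            have h1 := hocc i hi hval
            refine ⟨?_, h1.2⟩
            by_contra hcon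
            have hle2 : i ≤ pc.toNat := by omega
            rcases Nat.lt_or_ge i pc.toNat with hlt' | hge'
            · have := hpair i pc.toNat hi hpcn hlt'
              omega
            · have : i = pc.toNat := by omega
              exact heq (this ▸ hval)
          · omega
    · simp only [if_neg hle]
      symm
      simp only [decide_eq_false_iff_not]
      intro hmem
      obtain ⟨i, hi, hval⟩ := List.mem_iff_getElem.mp hmem
      have := hocc i hi hval
      omega

-- the top-level call decides membership in the sorted list
theorem bsLoop_mem (ms : List Int) (order : Int) (hs : ms.Pairwise (· ≤ ·)) :
    bsLoop ms order 0 ((ms.length : Int) - 1) (ms.length + 1) = decide (order ∈ ms) := by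
  apply bsLoop_correct ms order (ms.length + 1) 0 ((ms.length : Int) - 1) hs (by omega)
    (by omega)
  · intro i hi _
    omega
  · omega

theorem is_available_eq (menus orders : List Int) :
    is_available_to_order menus orders = is_available_to_order_alt menus orders := by
  unfold is_available_to_order is_available_to_order_alt
  set ms := PySem.List.sorted menus (fun x => x) false with hms
  have hs : ms.Pairwise (· ≤ ·) := PySem.List.sorted_pairwise menus (fun x => x)
  have hb : ∀ o : Int, bsLoop ms o 0 ((ms.length : Int) - 1) (ms.length + 1)
      = PySem.Set.contains (PySem.Set.ofList ms) o := by
    intro o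
    rw [bsLoop_mem ms o hs]
    simp [PySem.Set.contains, PySem.Set.mem_ofList]
  simp only [hb, PySem.List.foldl_if_add_one]
  by_cases hall : ∀ o ∈ orders, PySem.Set.contains (PySem.Set.ofList ms) o = true
  · have hc := (List.countP_eq_length
      (p := fun o => PySem.Set.contains (PySem.Set.ofList ms) o) (l := orders)).mpr hall
    rw [List.all_eq_true.mpr hall]
    simp [hc]
  · have hc : List.countP (fun o => PySem.Set.contains (PySem.Set.ofList ms) o) orders
        ≠ orders.length := fun hce => hall ((List.countP_eq_length
      (p := fun o => PySem.Set.contains (PySem.Set.ofList ms) o) (l := orders)).mp hce)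
    have h2 : orders.all (fun o => PySem.Set.contains (PySem.Set.ofList ms) o) = false :=
      Bool.eq_false_iff.mpr (fun ht => hall (List.all_eq_true.mp ht))
    have hcond : ¬ ((0 : Int) + (List.countP
        (fun o => PySem.Set.contains (PySem.Set.ofList ms) o) orders : Int)
        = (orders.length : Int)) := fun hce => hc (by omega)
    rw [h2, if_neg hcond]

-- ===== VERDICT (by name: the statement is the Claim_ definition above) =====
theorem is_available_to_order_spec : Claim_equal_is_available_to_order := by
  intro menus orders _
  unfold Spec_is_available_to_order
  exact is_available_eq menus orders
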